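-- pv_equiv track=rewrite | github.com/BolongTang/PrimitiveRoots | PrimitiveRoots.py | what_root_which_power
-- ===== SOURCE A (Python) =====
-- def what_root_which_power(quotient = 6, modulus = 7, cap = 3000, primitive_roots = [3,5]):
--     # quotient = 10, modulus = 11, cap = 3000, primitive_roots = [2,6,7,8]
--     # For x ** 9 = 6 mod 7,
--     # 6 is quotient
--     # 7 is modulus
--     # primitive roots are 3, 5
--     # 3 as base works, because 3 ** 3 = 27 equals to 6 mod 7 == 27 mod 7.
--     # Thus x = 3 ** y, x ** 9 = 3 ** (9 * y)
--     # GOAL: find a power of one of the the primitive roots that match the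
--     # rewrite of the quotient according to the modulus
--     # If primitive roots are (2, 6, 7, 8), a rewrite of 32 = 2 ** 5 works because 2 in roots and 2 is base.
--
--     # Rewrite of the quotient according to the modulus. Rewrite 10 mod 11 becomes 10 + 11k.
--     # quotient = 10 # Customizable
--     # modulus = 11 # Customizable
--     # quotient_rewrites = [] # Rewritten quotient
--     # cap = 3000 # Search up till this number, capping both the rewrite and the powers of the roots.
--
--     # Below the cap, go up. Rewrite it with modulus, each time adding one. 10 mod 11 becomes 21 mod 11.
--     # while quotient < cap:
--     #     quotient_rewrites.append(quotient)
--     #     quotient += modulus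
--
--     # primitive_roots = [2,6,7,8] # Found from the table according to a specific modulus.
--     roots_powers = [] # Stores lists. Each list has the powers of the primitive root in the corresponding location.
--     # If roots are [2,6,7,8], root_powers[0] gives powers of 2, [1] gives powers of 6.
--     for root in primitive_roots: # 2
--         root_power = [] # 2 ** 1, 2 ** 2, 2 ** 3, ..., till cap.
--         power = 1
--         while root ** power < cap:
--             root_power.append(root ** power)
--             power += 1
--         roots_powers.append(root_power)
--
--     # See if any power of the primitive root is in the quotient_rewrites
--     # If roots are [2,6,7,8], search 2 first, index is zero (for later access)
--     # Loop through root_power of 2, so 2, 4, 8, 16, ... till cap.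
--     # If one match something in the primitive roots, then it is
--     # A candidate to choose.
--
--     # TODO: do direct computation on 2**5 % 11 == 10 each time,
--     # rather than computing all multiples of the quotient, to save space.
--
--     # Delete quotient_rewrites, delete append to quotient_rewrites,
--     # Leave primitive roots powers section,
--     # Implement loop through powers, check each equaling quotient when modding the modulus. 2**5 % 11 == 10
--     root_power_pairs = []
--
--     for i in range(len(roots_powers)):
--         # i tracks the root we're on, shared between root_powers and primitive_roots.
--         # i points to 2 and the list of 2's powers.
--         root_powers = roots_powers[i]
--         power = 1
--         for root_power in root_powers:
--             if root_power % modulus == quotient: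
--             # Return the root and its power.
--             # Rewrite quotient with the root to the power. So 5 ** 34.
--             # Rewrite x with root to y. So x = 5 ** y.
--             # At i=0, the power is 1. At i=1, the power is 2. Thus return one more than i.
--                 root_power_pairs.append((primitive_roots[i], power))
--             power += 1
--
--     return root_power_pairs
-- ===== SOURCE B (Python) =====
-- def what_root_which_power(quotient = 6, modulus = 7, cap = 3000, primitive_roots = [3,5]):
--     # Single fused pass: no intermediate table of power lists.
--     pairs = []
--     for root in primitive_roots:
--         power = 1
--         while root ** power < cap:
--             if (root ** power) % modulus == quotient:
--                 pairs.append((root, power))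
--             power += 1
--     return pairs
-- ===== Notes on version B (the rewrite author's own statement) =====
-- stated objective: simpler
-- what changed: B drops A's intermediate list-of-lists of root powers and its index-based rescan, emitting (root, power) pairs in one fused loop per root.
import Mathlib
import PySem

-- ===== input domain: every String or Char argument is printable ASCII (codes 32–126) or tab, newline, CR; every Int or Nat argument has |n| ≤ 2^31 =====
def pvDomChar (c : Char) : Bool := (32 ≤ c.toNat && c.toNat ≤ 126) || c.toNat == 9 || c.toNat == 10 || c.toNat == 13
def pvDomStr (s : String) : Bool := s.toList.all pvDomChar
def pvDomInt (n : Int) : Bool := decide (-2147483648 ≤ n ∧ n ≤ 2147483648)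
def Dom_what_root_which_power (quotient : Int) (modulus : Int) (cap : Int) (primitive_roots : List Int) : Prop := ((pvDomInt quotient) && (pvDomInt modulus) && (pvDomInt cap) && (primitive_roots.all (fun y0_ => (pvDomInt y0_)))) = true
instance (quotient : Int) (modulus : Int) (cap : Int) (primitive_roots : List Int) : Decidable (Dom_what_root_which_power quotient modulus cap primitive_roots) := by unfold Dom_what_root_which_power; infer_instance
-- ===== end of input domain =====

-- B fuses A's two phases (build power table, then rescan it by index) into one loop per
-- root, so the intermediate list-of-lists disappears; objective: simpler, same cost.

-- ===== PORT A =====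
-- the 'while root ** power < cap' loop; fuel only makes the recursion total — under
-- Pre_ (and Dom's |cap| ≤ 2^31) 64 steps are never exhausted before the guard fails
def pvPowLoop (root : Int) (cap : Int) (power : Int) : Nat → List Int
  | 0 => []
  | fuel + 1 =>
    if root ^ power.toNat < cap then
      root ^ power.toNat :: pvPowLoop root cap (power + 1) fuel
    else []

-- the inner 'for root_power in root_powers' loop with its running 'power' counter
def pvScanLoop (quotient : Int) (modulus : Int) (root : Int) (power : Int) : List Int → List (Int × Int)
  | [] => []
  | rp :: rest =>
    (if PySem.Int.mod rp modulus = quotient then [(root, power)] else []) ++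
      pvScanLoop quotient modulus root (power + 1) rest

def what_root_which_power (quotient : Int) (modulus : Int) (cap : Int) (primitive_roots : List Int) : List (Int × Int) :=
  let roots_powers : List (List Int) :=
    primitive_roots.foldl (fun acc root => acc ++ [pvPowLoop root cap 1 64]) []
  (PySem.List.pyRange 0 (PySem.List.len roots_powers) 1).foldl
    (fun pairs i =>
      pairs ++ pvScanLoop quotient modulus (PySem.List.pyGetD primitive_roots i 0) 1
        (PySem.List.pyGetD roots_powers i []))
    []

-- ===== PORT B =====
-- the fused 'while root ** power < cap' loop of Source B (same total-making fuel)
def pvFusedLoop (quotient : Int) (modulus : Int) (cap : Int) (root : Int) (power : Int) : Nat → List (Int × Int)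
  | 0 => []
  | fuel + 1 =>
    if root ^ power.toNat < cap then
      (if PySem.Int.mod (root ^ power.toNat) modulus = quotient then [(root, power)] else []) ++
        pvFusedLoop quotient modulus cap root (power + 1) fuel
    else []

def what_root_which_power_alt (quotient : Int) (modulus : Int) (cap : Int) (primitive_roots : List Int) : List (Int × Int) :=
  primitive_roots.foldl (fun pairs root => pairs ++ pvFusedLoop quotient modulus cap root 1 64) []

-- ===== PRECONDITION & SPEC =====
-- Pre_ excludes exactly the inputs where Python A does not return: the while loop
-- diverges for a root in {-1, 0, 1} whose powers stay below cap forever, and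
-- 'root_power % modulus' raises ZeroDivisionError when modulus = 0 and some power
-- (i.e. some root < cap) was collected.
def Pre_what_root_which_power (quotient : Int) (modulus : Int) (cap : Int) (primitive_roots : List Int) : Prop :=
  (∀ r ∈ primitive_roots, (2 ≤ r ∨ r ≤ -2) ∨ (r = 0 ∧ cap ≤ 0) ∨ (r ≠ 0 ∧ cap ≤ 1)) ∧
  (modulus ≠ 0 ∨ ∀ r ∈ primitive_roots, ¬ r < cap)
instance (quotient : Int) (modulus : Int) (cap : Int) (primitive_roots : List Int) : Decidable (Pre_what_root_which_power quotient modulus cap primitive_roots) := by unfold Pre_what_root_which_power; infer_instance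

def pvWitness_what_root_which_power : Int × Int × Int × List Int := (6, 7, 3000, [3, 5])

def Spec_what_root_which_power (quotient : Int) (modulus : Int) (cap : Int) (primitive_roots : List Int) (out : List (Int × Int)) : Prop := out = what_root_which_power_alt quotient modulus cap primitive_roots
instance (quotient : Int) (modulus : Int) (cap : Int) (primitive_roots : List Int) (out : List (Int × Int)) : Decidable (Spec_what_root_which_power quotient modulus cap primitive_roots out) := by unfold Spec_what_root_which_power; infer_instance

-- ===== CLAIM (what is proved, stated in full; the proofs are below) =====
def Claim_equal_what_root_which_power : Prop := ∀ (quotient : Int) (modulus : Int) (cap : Int) (primitive_roots : List Int), Dom_what_root_which_power quotient modulus cap primitive_roots → Pre_what_root_which_power quotient modulus cap primitive_roots → Spec_what_root_which_power quotient modulus cap primitive_roots (what_root_which_power quotient modulus cap primitive_roots)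

-- ===== LEMMAS AND PROOFS =====

-- scanning a built power list with the running counter = the fused loop (same fuel)
theorem pvScan_pow_eq_fused (quotient modulus cap root : Int) :
    ∀ (fuel : Nat) (power : Int),
      pvScanLoop quotient modulus root power (pvPowLoop root cap power fuel) =
        pvFusedLoop quotient modulus cap root power fuel := by
  intro fuel
  induction fuel with
  | zero => intro power; rfl
  | succ n ih =>
    intro power
    simp only [pvPowLoop, pvFusedLoop]
    split
    · simp only [pvScanLoop, ih]
    · rfl

-- ===== VERDICT (by name: the statement is the Claim_ definition above) =====
theorem what_root_which_power_spec : Claim_equal_what_root_which_power := by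
  intro quotient modulus cap primitive_roots _hDom _hPre
  unfold Spec_what_root_which_power what_root_which_power what_root_which_power_alt
  rw [PySem.List.foldl_append_singleton_eq_map]
  simp only [List.nil_append]
  have hcong := PySem.List.foldl_congr_mem
      (PySem.List.pyRange 0 (PySem.List.len (primitive_roots.map (fun root => pvPowLoop root cap 1 64))))
      (fun pairs i =>
        pairs ++ pvScanLoop quotient modulus (PySem.List.pyGetD primitive_roots i 0) 1
          (PySem.List.pyGetD (primitive_roots.map (fun root => pvPowLoop root cap 1 64)) i []))
      (fun pairs i =>
        pairs ++ pvScanLoop quotient modulus (PySem.List.pyGetD primitive_roots i 0) 1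
          (pvPowLoop (PySem.List.pyGetD primitive_roots i 0) cap 1 64))
      []
      (by
        intro acc i hi
        dsimp only
        rw [PySem.List.mem_pyRange_one] at hi
        simp only [PySem.List.len_eq, List.length_map] at hi
        congr 1
        rw [PySem.List.pyGetD_eq_getElem _ _ hi.1
              (by simpa [PySem.List.len_eq] using hi.2),
            PySem.List.pyGetD_eq_getElem _ _ hi.1
              (by simpa using hi.2)]
        simp)
  rw [hcong]
  have hlen : PySem.List.len ((primitive_roots.map (fun root => pvPowLoop root cap 1 64))) =
      PySem.List.len primitive_roots := by simp [PySem.List.len_eq]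
  rw [hlen,
      PySem.List.foldl_pyRange_zero_pyGetD primitive_roots 0
        (fun pairs r =>
          pairs ++ pvScanLoop quotient modulus r 1 (pvPowLoop r cap 1 64)) []]
  exact PySem.List.foldl_congr_mem primitive_roots _ _ []
    (by intro pairs r _; rw [pvScan_pow_eq_fused])
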